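-- pv_equiv track=rewrite | github.com/plebdev7/idle-deck-builder | simulator/simulator/core/cards.py | _determine_generator_type
-- ===== SOURCE A (Python) =====
-- from enum import Enum
-- from typing import Any
--
-- class GeneratorType(str, Enum):
--     """Generator card subtypes."""
--
--     RATE = "rate"  # +X Essence/sec
--     BURST = "burst"  # +X flat Essence
--     HYBRID = "hybrid"  # +X Essence/sec + combat stats
--     MULTIPLIER = "multiplier"  # +(Current rate * Y seconds)
--     CONDITIONAL = "conditional"  # +X if condition met
--
-- def _determine_generator_type(effects: list[dict[str, Any]]) -> GeneratorType:
--     """Determine generator subtype based on effects.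
--
--     Args:
--         effects: List of effect dictionaries
--
--     Returns:
--         GeneratorType enum value
--     """
--     has_rate = any(e.get("effect_type") == "essence_per_sec" for e in effects)
--     has_burst = any(e.get("effect_type") == "essence_flat" for e in effects)
--     has_combat = any(e.get("effect_type") in ["add_attack", "add_defense"] for e in effects)
--
--     if has_rate and has_combat:
--         return GeneratorType.HYBRID
--     elif has_rate:
--         return GeneratorType.RATE
--     elif has_burst:
--         return GeneratorType.BURST
--     else:
--         return GeneratorType.RATE  # Default
-- ===== SOURCE B (Python) =====
-- from enum import Enum
-- from typing import Any
--
--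
-- class GeneratorType(str, Enum):
--     RATE = "rate"
--     BURST = "burst"
--     HYBRID = "hybrid"
--     MULTIPLIER = "multiplier"
--     CONDITIONAL = "conditional"
--
--
-- def _determine_generator_type(effects: list[dict[str, Any]]) -> GeneratorType:
--     """Single pass over effects maintaining three flags, with early exit."""
--     has_rate = has_burst = has_combat = False
--     for e in effects:
--         t = e.get("effect_type")
--         if t == "essence_per_sec":
--             has_rate = True
--         elif t == "essence_flat":
--             has_burst = True
--         elif t == "add_attack" or t == "add_defense":
--             has_combat = True
--         if has_rate and has_combat:
--             break
--     if has_rate and has_combat: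
--         return GeneratorType.HYBRID
--     if has_rate:
--         return GeneratorType.RATE
--     if has_burst:
--         return GeneratorType.BURST
--     return GeneratorType.RATE
-- ===== Notes on version B (the rewrite author's own statement) =====
-- stated objective: alternative
-- what changed: Replaces three separate any() scans over the effect list with a single loop maintaining three flags and an early break once rate+combat are both seen.
import Mathlib
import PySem

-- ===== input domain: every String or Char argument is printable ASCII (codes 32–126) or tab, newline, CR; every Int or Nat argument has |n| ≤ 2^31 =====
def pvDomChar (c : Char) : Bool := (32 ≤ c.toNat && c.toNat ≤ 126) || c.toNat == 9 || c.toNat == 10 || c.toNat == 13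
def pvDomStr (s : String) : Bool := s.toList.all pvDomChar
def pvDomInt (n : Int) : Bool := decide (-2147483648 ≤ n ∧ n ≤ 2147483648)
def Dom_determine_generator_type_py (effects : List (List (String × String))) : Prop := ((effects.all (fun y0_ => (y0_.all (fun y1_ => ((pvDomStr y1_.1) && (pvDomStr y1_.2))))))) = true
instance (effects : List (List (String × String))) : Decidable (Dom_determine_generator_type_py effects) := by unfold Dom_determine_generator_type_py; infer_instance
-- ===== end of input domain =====

-- B replaces A's three any() scans with one flag-carrying loop over effects (early break); same result.

-- ===== PORT A =====
def determine_generator_type_py (effects : List (List (String × String))) : String :=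
  let has_rate := effects.any (fun e => (PySem.Dict.mk e).get? "effect_type" == some "essence_per_sec")
  let has_burst := effects.any (fun e => (PySem.Dict.mk e).get? "effect_type" == some "essence_flat")
  let has_combat := effects.any (fun e =>
    let t := (PySem.Dict.mk e).get? "effect_type"
    t == some "add_attack" || t == some "add_defense")
  if has_rate && has_combat then "hybrid"
  else if has_rate then "rate"
  else if has_burst then "burst"
  else "rate"

-- ===== PORT B =====
-- loop from Source B: scans effects once, carrying the three flags; stops early on rate ∧ combat
def dgtLoop : List (List (String × String)) → Bool → Bool → Bool → Bool × Bool × Bool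
  | [], r, b, c => (r, b, c)
  | e :: rest, r, b, c =>
    let t := (PySem.Dict.mk e).get? "effect_type"
    let s :=
      if t == some "essence_per_sec" then (true, b, c)
      else if t == some "essence_flat" then (r, true, c)
      else if t == some "add_attack" || t == some "add_defense" then (r, b, true)
      else (r, b, c)
    if s.1 && s.2.2 then s else dgtLoop rest s.1 s.2.1 s.2.2

def determine_generator_type_py_alt (effects : List (List (String × String))) : String :=
  let s := dgtLoop effects false false false
  if s.1 && s.2.2 then "hybrid"
  else if s.1 then "rate"
  else if s.2.1 then "burst"
  else "rate"

-- ===== PRECONDITION & SPEC =====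
def Spec_determine_generator_type_py (effects : List (List (String × String))) (out : String) : Prop := out = determine_generator_type_py_alt effects
instance (effects : List (List (String × String))) (out : String) : Decidable (Spec_determine_generator_type_py effects out) := by unfold Spec_determine_generator_type_py; infer_instance

-- ===== CLAIM (what is proved, stated in full; the proofs are below) =====
def Claim_equal_determine_generator_type_py : Prop := ∀ (effects : List (List (String × String))), Dom_determine_generator_type_py effects → Spec_determine_generator_type_py effects (determine_generator_type_py effects)

-- ===== LEMMAS AND PROOFS =====

def dgtClassify (r b c : Bool) : String :=
  if r && c then "hybrid" else if r then "rate" else if b then "burst" else "rate"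

theorem dgtLoop_classify (es : List (List (String × String))) : ∀ (r b c : Bool),
    (let s := dgtLoop es r b c; dgtClassify s.1 s.2.1 s.2.2) =
      dgtClassify
        (r || es.any (fun e => (PySem.Dict.mk e).get? "effect_type" == some "essence_per_sec"))
        (b || es.any (fun e => (PySem.Dict.mk e).get? "effect_type" == some "essence_flat"))
        (c || es.any (fun e =>
          let t := (PySem.Dict.mk e).get? "effect_type"
          t == some "add_attack" || t == some "add_defense")) := by
  induction es with
  | nil => intro r b c; simp [dgtLoop]
  | cons e rest ih =>
    intro r b c
    simp only [dgtLoop, List.any_cons]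
    by_cases h1 : ((PySem.Dict.mk e).get? "effect_type" == some "essence_per_sec") = true
    · have ht := eq_of_beq h1
      rw [ht]
      by_cases hc : c = true
      · subst hc; simp [dgtClassify]
      · simp only [Bool.not_eq_true] at hc; subst hc
        simpa using ih true b false
    · simp only [Bool.not_eq_true] at h1
      by_cases h2 : ((PySem.Dict.mk e).get? "effect_type" == some "essence_flat") = true
      · have ht := eq_of_beq h2
        rw [ht]
        by_cases hrc : r = true ∧ c = true
        · obtain ⟨hr, hc⟩ := hrc; subst hr; subst hc; simp [dgtClassify]
        · rw [ht] at h1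
          simp only [h1, Bool.false_or]
          simpa [hrc] using ih r true c
      · simp only [Bool.not_eq_true] at h2
        by_cases h3 : (((PySem.Dict.mk e).get? "effect_type" == some "add_attack")
            || ((PySem.Dict.mk e).get? "effect_type" == some "add_defense")) = true
        · by_cases hr : r = true
          · subst hr; simp [h1, h2, h3, dgtClassify]
          · simp only [Bool.not_eq_true] at hr; subst hr
            simpa [h1, h2, h3] using ih false b true
        · simp only [Bool.not_eq_true] at h3
          by_cases hrc : r = true ∧ c = true
          · obtain ⟨hr, hc⟩ := hrc; subst hr; subst hc; simp [h1, h2, h3, dgtClassify]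
          · simpa [h1, h2, h3, hrc] using ih r b c

-- ===== VERDICT (by name: the statement is the Claim_ definition above) =====
theorem determine_generator_type_py_spec : Claim_equal_determine_generator_type_py := by
  intro effects _
  unfold Spec_determine_generator_type_py determine_generator_type_py determine_generator_type_py_alt
  have h := dgtLoop_classify effects false false false
  simp only [Bool.false_or] at h
  simpa [dgtClassify] using h.symm
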